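-- pv_equiv track=rewrite | github.com/LuisTerceroIII/Ejercicios-Listas-Cadenas-y-funciones | Modelo  2 - Segundo Parcial.py | biggerNotPrime
-- ===== SOURCE A (Python) =====
-- def isPrime(number):
--     cant = 0
--     for i in range(1,number+1):
--         if(number%i == 0):
--             cant = cant + 1
--     return cant == 2
--
-- def biggerNotPrime(list1):
--     bigger = 0
--     noPrimesList = []
--     for element in list1:
--         if(not isPrime(element)):
--             noPrimesList.append(element)
--     if(len(noPrimesList) == 0):
--         return -1
--     else:
--         for i in range(len(noPrimesList)):
--             if(bigger < noPrimesList[i]):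
--                 bigger = noPrimesList[i]
--         return bigger
-- ===== SOURCE B (Python) =====
-- def _is_prime(n):
--     if n < 2:
--         return False
--     d = 2
--     while d * d <= n:
--         if n % d == 0:
--             return False
--         d += 1
--     return True
--
-- def biggerNotPrime(list1):
--     best = 0
--     found = False
--     for x in list1:
--         if not _is_prime(x):
--             found = True
--             if x > best:
--                 best = x
--     return best if found else -1
-- ===== Notes on version B (the rewrite author's own statement) =====
-- stated objective: faster
-- what changed: Replaces the full divisor-count primality test (loop over 1..n) and the two-pass filter-then-max with trial division up to sqrt(n) fused into a single max-tracking pass.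
import Mathlib
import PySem

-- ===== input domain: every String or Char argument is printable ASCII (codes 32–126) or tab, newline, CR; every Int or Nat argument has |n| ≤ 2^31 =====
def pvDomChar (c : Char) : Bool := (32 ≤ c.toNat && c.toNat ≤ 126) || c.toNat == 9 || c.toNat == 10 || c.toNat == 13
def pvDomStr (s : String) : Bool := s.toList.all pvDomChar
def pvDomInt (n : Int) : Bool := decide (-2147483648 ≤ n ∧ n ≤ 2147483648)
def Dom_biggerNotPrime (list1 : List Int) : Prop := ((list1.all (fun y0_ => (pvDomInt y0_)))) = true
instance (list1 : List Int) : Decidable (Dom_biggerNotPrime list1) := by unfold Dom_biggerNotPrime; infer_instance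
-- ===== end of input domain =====

-- B fuses A's filter-then-max two-pass into one pass and replaces the count-all-divisors
-- primality test by trial division up to sqrt(n); return value proved identical on all inputs.


-- ===== PORT A =====
-- isPrime of Source A: counts the divisors of `number` among 1..number and tests the count for 2
def isPrimeA (number : Int) : Bool :=
  ((PySem.List.pyRange 1 (number + 1) 1).foldl
      (fun cant i => if PySem.Int.mod number i == 0 then cant + 1 else cant) (0 : Int)) == 2

def biggerNotPrime (list1 : List Int) : Int :=
  let noPrimesList := list1.foldl (fun acc element => if !isPrimeA element then acc ++ [element] else acc) []
  if noPrimesList.length == 0 then -1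
  else
    (PySem.List.pyRange 0 (noPrimesList.length : Int) 1).foldl
      (fun bigger i =>
        if bigger < PySem.List.pyGetD noPrimesList i 0 then PySem.List.pyGetD noPrimesList i 0 else bigger) 0

-- ===== PORT B =====
-- the 'while d * d <= n' trial-division loop of Source B's _is_prime
-- (structural recursion on a fuel counter; fuel n+1 ≥ n+1-d is always sufficient, see trialB_iff)
def trialB (n : Nat) : Nat → Nat → Bool
  | 0, _ => true
  | fuel + 1, d =>
    if d * d ≤ n then (if n % d == 0 then false else trialB n fuel (d + 1)) else true

def isPrimeB (n : Int) : Bool := if n < 2 then false else trialB n.toNat (n.toNat + 1) 2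

def biggerNotPrime_alt (list1 : List Int) : Int :=
  let r := list1.foldl
    (fun (s : Bool × Int) x => if !isPrimeB x then (true, if s.2 < x then x else s.2) else s)
    (false, 0)
  if r.1 then r.2 else -1

-- ===== PRECONDITION & SPEC =====
def Spec_biggerNotPrime (list1 : List Int) (out : Int) : Prop := out = biggerNotPrime_alt list1
instance (list1 : List Int) (out : Int) : Decidable (Spec_biggerNotPrime list1 out) := by unfold Spec_biggerNotPrime; infer_instance

-- ===== CLAIM (what is proved, stated in full; the proofs are below) =====
def Claim_equal_biggerNotPrime : Prop := ∀ (list1 : List Int), Dom_biggerNotPrime list1 → Spec_biggerNotPrime list1 (biggerNotPrime list1)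

-- ===== LEMMAS AND PROOFS =====

-- with sufficient fuel, trialB n fuel d is true iff n has no divisor e with d ≤ e and e*e ≤ n
lemma trialB_iff (n : Nat) : ∀ k d, n + 1 - d ≤ k →
    (trialB n k d = true ↔ ∀ e, d ≤ e → e * e ≤ n → ¬ e ∣ n) := by
  intro k
  induction k with
  | zero =>
    intro d hd
    constructor
    · intro _ e hde he hdvd
      rcases Nat.eq_zero_or_pos e with rfl | hpos
      · omega
      · have := Nat.le_mul_of_pos_left e hpos; omega
    · intro _; rfl
  | succ k ih =>
    intro d hd
    rw [trialB]
    by_cases h : d * d ≤ n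
    · rw [if_pos h]
      by_cases hm : n % d = 0
      · rw [if_pos (by simpa using hm)]
        constructor
        · simp
        · intro hall
          exact absurd (Nat.dvd_of_mod_eq_zero hm) (hall d Nat.le.refl h)
      · rw [if_neg (by simpa using hm)]
        have hdn : n + 1 - (d + 1) ≤ k := by
          rcases Nat.eq_zero_or_pos d with rfl | hpos
          · omega
          · have := Nat.le_mul_of_pos_left d hpos; omega
        rw [ih (d + 1) hdn]
        constructor
        · intro hall e hde he hdvd
          rcases Nat.eq_or_lt_of_le hde with rfl | hlt
          · exact hm (Nat.eq_zero_of_dvd_of_lt hdvd (by omega) ▸ Nat.mod_eq_zero_of_dvd hdvd)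
          · exact hall e hlt he hdvd
        · intro hall e hde he; exact hall e (by omega) he
    · rw [if_neg h]
      constructor
      · intro _ e hde he hdvd
        exact h (Nat.le_trans (Nat.mul_le_mul hde hde) he)
      · intro _; rfl

-- countP over List.range as a Finset.filter cardinality
lemma countP_card (N : Nat) (p : Nat → Bool) :
    (List.range N).countP p = ((Finset.range N).filter (fun k => p k = true)).card := by
  rw [List.countP_eq_length_filter,
      ← List.toFinset_card_of_nodup ((List.nodup_range).filter p)]
  congr 1
  rw [List.toFinset_filter, List.toFinset_range]

-- the divisors of N among 1..N are exactly N.divisors (bijection k ↦ 1+k)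
lemma card_div_eq (N : Nat) (hN : N ≠ 0) :
    ((Finset.range N).filter (fun k => (1 + k) ∣ N)).card = N.divisors.card := by
  apply Finset.card_nbij' (fun k => 1 + k) (fun d => d - 1)
  · intro a ha
    simp only [Finset.mem_coe, Finset.mem_filter, Finset.mem_range] at ha
    simp only [Finset.mem_coe, Nat.mem_divisors]
    exact ⟨ha.2, hN⟩
  · intro b hb
    simp only [Finset.mem_coe, Nat.mem_divisors] at hb
    have hb1 : 1 ≤ b := Nat.pos_of_dvd_of_pos hb.1 (Nat.pos_of_ne_zero hN)
    have hbN : b ≤ N := Nat.le_of_dvd (Nat.pos_of_ne_zero hN) hb.1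
    simp only [Finset.mem_coe, Finset.mem_filter, Finset.mem_range]
    refine ⟨by omega, ?_⟩
    have h1 : 1 + (b - 1) = b := by omega
    rw [h1]; exact hb.1
  · intro a ha; simp
  · intro b hb
    simp only [Finset.mem_coe, Nat.mem_divisors] at hb
    have hb1 : 1 ≤ b := Nat.pos_of_dvd_of_pos hb.1 (Nat.pos_of_ne_zero hN)
    simp; omega

-- a number ≥ 2 is prime iff it has exactly two divisors
lemma prime_iff_card (N : Nat) (h2 : 2 ≤ N) : N.divisors.card = 2 ↔ N.Prime := by
  constructor
  · intro hc
    by_contra hnp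
    rw [Nat.prime_def_lt'] at hnp
    push Not at hnp
    obtain ⟨m, hm2, hmN, hmd⟩ := hnp h2
    have hsub : ({1, m, N} : Finset Nat) ⊆ N.divisors := by
      intro x hx
      simp only [Finset.mem_insert, Finset.mem_singleton] at hx
      rcases hx with rfl | rfl | rfl
      · simp [Nat.mem_divisors]; omega
      · simp [Nat.mem_divisors, hmd]; omega
      · simp [Nat.mem_divisors]; omega
    have hcard : ({1, m, N} : Finset Nat).card = 3 := by
      rw [Finset.card_insert_of_notMem (by simp; omega),
          Finset.card_insert_of_notMem (by simp; omega), Finset.card_singleton]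
    have := Finset.card_le_card hsub
    omega
  · intro hp
    rw [hp.divisors, Finset.card_insert_of_notMem (by simp; omega), Finset.card_singleton]

-- the two primality tests agree on every integer
lemma isPrime_agree (n : Int) : isPrimeA n = isPrimeB n := by
  by_cases hlt : n < 2
  · have hB : isPrimeB n = false := by simp [isPrimeB, hlt]
    rw [hB]
    by_cases h0 : n + 1 ≤ 1
    · simp [isPrimeA, PySem.List.pyRange_one_eq_nil h0]
    · have hn1 : n = 1 := by omega
      subst hn1; decide
  · have hN2 : 2 ≤ n.toNat := by omega
    have hn : n = (n.toNat : Int) := by omega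
    have hA : isPrimeA n = true ↔ n.toNat.Prime := by
      unfold isPrimeA
      rw [PySem.List.pyRange_one]
      have ht : (n + 1 - 1).toNat = n.toNat := by omega
      rw [ht, List.foldl_map, PySem.List.foldl_if_add_one]
      have hcp : (List.range n.toNat).countP (fun (k : Nat) => PySem.Int.mod n (1 + (k : Int)) == 0)
          = (List.range n.toNat).countP (fun k => decide ((1 + k) ∣ n.toNat)) := by
        apply List.countP_congr
        intro k _
        have : (PySem.Int.mod n (1 + (k : Int)) = 0) ↔ ((1 + k) ∣ n.toNat) := by
          rw [PySem.Int.mod_eq_zero_iff_dvd]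
          rw [hn]
          constructor
          · intro h; exact_mod_cast h
          · intro h; exact_mod_cast h
        simp [this]
      rw [hcp, countP_card]
      have hfe : ((Finset.range n.toNat).filter (fun k => decide ((1 + k) ∣ n.toNat) = true))
          = ((Finset.range n.toNat).filter (fun k => (1 + k) ∣ n.toNat)) := by
        apply Finset.filter_congr; intro x _; simp
      rw [hfe, card_div_eq n.toNat (by omega)]
      simp only [beq_iff_eq]
      rw [← prime_iff_card n.toNat hN2]
      constructor <;> intro h <;> omega
    have hB : isPrimeB n = true ↔ n.toNat.Prime := by
      unfold isPrimeB
      rw [if_neg hlt, trialB_iff n.toNat (n.toNat + 1) 2 (by omega)]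
      rw [Nat.prime_def_le_sqrt]
      constructor
      · intro h
        exact ⟨hN2, fun m hm hms => h m hm (Nat.le_sqrt.mp hms)⟩
      · intro h e he hee
        exact h.2 e he (Nat.le_sqrt.mpr hee)
    rw [Bool.eq_iff_iff]
    exact hA.trans hB.symm

-- B's fused fold in terms of the filtered list
lemma foldB (l : List Int) : ∀ (b : Bool) (m : Int),
    l.foldl (fun (s : Bool × Int) x => if !isPrimeB x then (true, if s.2 < x then x else s.2) else s) (b, m)
      = (b || !(l.filter (fun x => !isPrimeB x)).isEmpty,
         (l.filter (fun x => !isPrimeB x)).foldl (fun bigger v => if bigger < v then v else bigger) m) := by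
  induction l with
  | nil => intro b m; simp
  | cons x l ih =>
    intro b m
    by_cases hx : isPrimeB x = true
    · simpa [hx] using ih b m
    · simpa [hx] using ih true (if m < x then x else m)

-- ===== VERDICT (by name: the statement is the Claim_ definition above) =====
theorem biggerNotPrime_spec : Claim_equal_biggerNotPrime := by
  intro list1 _
  show biggerNotPrime list1 = biggerNotPrime_alt list1
  unfold biggerNotPrime biggerNotPrime_alt
  have hfilter : (fun x => !isPrimeA x) = (fun x => !isPrimeB x) := by
    funext x; rw [isPrime_agree]
  have hA : List.foldl (fun acc element => if !isPrimeA element then acc ++ [element] else acc) [] list1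
      = list1.filter (fun x => !isPrimeA x) := by
    simpa using PySem.List.foldl_append_if (fun x => !isPrimeA x) (fun x : Int => x) list1 []
  simp only [hA, hfilter, foldB, Bool.false_or]
  set nl := list1.filter (fun x => !isPrimeB x) with hnl
  rw [PySem.List.foldl_pyRange_zero_pyGetD' nl 0 (fun bigger v => if bigger < v then v else bigger) 0]
  cases nl with
  | nil => simp
  | cons y ys => simp
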